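-- pv_equiv track=rewrite | github.com/Devender00999/DSA_101 | Python/Resursion/42. Lucky Number.py | printLuckyNumberLoop
-- ===== SOURCE A (Python) =====
-- def printLuckyNumberLoop(n):
--     k = 1
--     arr = []
--     for i in range(n):
--         arr.append(i + 1)
--
--     while k < len(arr):
--         i = k
--         while i < len(arr):
--             arr.pop(i)
--             i += k
--         k += 1
--     try:
--         arr.index(n)
--         return True
--     except:
--         return False
-- ===== SOURCE B (Python) =====
-- def printLuckyNumberLoop(n):
--     if n < 1:
--         return False
--     idx = n - 1   # 0-based position of the value n in the virtual list 1..n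
--     L = n         # current length of the virtual list
--     k = 1
--     while k < L:
--         # pass k removes every (k+1)-th element (1-indexed)
--         if (idx + 1) % (k + 1) == 0:
--             return False
--         idx -= idx // (k + 1)
--         L -= L // (k + 1)
--         k += 1
--     return True
-- ===== Notes on version B (the rewrite author's own statement) =====
-- stated objective: faster
-- what changed: Instead of materialising the list and repeatedly popping elements, B tracks only the position of the value n and the current length through the sieve passes with modular arithmetic, so no list is ever built.
import Mathlib
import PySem

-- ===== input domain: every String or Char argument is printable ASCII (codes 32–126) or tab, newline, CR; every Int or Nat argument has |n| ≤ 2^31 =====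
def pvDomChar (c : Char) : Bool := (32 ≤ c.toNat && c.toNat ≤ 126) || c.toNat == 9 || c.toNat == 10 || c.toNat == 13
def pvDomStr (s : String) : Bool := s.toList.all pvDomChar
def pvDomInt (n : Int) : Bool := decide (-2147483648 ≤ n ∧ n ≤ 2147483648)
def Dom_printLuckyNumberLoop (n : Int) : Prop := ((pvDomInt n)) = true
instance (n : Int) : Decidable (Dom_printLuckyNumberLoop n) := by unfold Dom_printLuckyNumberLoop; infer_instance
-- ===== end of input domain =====

-- B replaces A's quadratic build-and-pop list sieve by O(1)-memory position/length
-- arithmetic tracking only the value n through the passes (objective: faster).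


-- ===== PORT A =====
-- inner 'while i < len(arr): arr.pop(i); i += k'  (arr.pop(i) with i < len(arr) is exactly
-- List.eraseIdx).  The loop is run with structural recursion on a fuel argument; fuel = arr.length
-- is always enough, because every iteration removes one element (proved in innerA_fuel_irrelevant
-- territory below: all lemmas carry the sufficiency hypothesis arr.length ≤ fuel + i).
def innerA (k i : Nat) (arr : List Int) (fuel : Nat) : List Int :=
  match fuel with
  | 0 => arr
  | fuel + 1 => if i < arr.length then innerA k (i + k) (arr.eraseIdx i) fuel else arr

-- outer 'while k < len(arr): … ; k += 1'; fuel = arr.length is enough because k only grows and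
-- len(arr) never grows.
def outerA (k : Nat) (arr : List Int) (fuel : Nat) : List Int :=
  match fuel with
  | 0 => arr
  | fuel + 1 => if k < arr.length then outerA (k + 1) (innerA k k arr arr.length) fuel else arr

def printLuckyNumberLoop (n : Int) : Bool :=
  -- for i in range(n): arr.append(i + 1)
  let arr : List Int := (PySem.List.pyRange 0 n 1).foldl (fun a i => a ++ [i + 1]) []
  let arr := outerA 1 arr arr.length
  -- try: arr.index(n); return True / except: return False
  match PySem.List.index? arr n with
  | some _ => true
  | none => false

-- ===== PORT B =====
-- B's while loop; all of k, idx, L stay nonnegative in B, so Nat /, % are exactly Python's // and %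
def loopB (k idx L : Nat) : Bool :=
  if _h : k < L then
    if (idx + 1) % (k + 1) = 0 then false
    else loopB (k + 1) (idx - idx / (k + 1)) (L - L / (k + 1))
  else true
termination_by L - k
decreasing_by have := Nat.div_pos (by omega : k + 1 ≤ L) (by omega : 0 < k + 1); omega

def printLuckyNumberLoop_alt (n : Int) : Bool :=
  if n < 1 then false
  else loopB 1 (n - 1).toNat n.toNat

-- ===== PRECONDITION & SPEC =====
def Spec_printLuckyNumberLoop (n : Int) (out : Bool) : Prop := out = printLuckyNumberLoop_alt n
instance (n : Int) (out : Bool) : Decidable (Spec_printLuckyNumberLoop n out) := by unfold Spec_printLuckyNumberLoop; infer_instance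

-- ===== CLAIM (what is proved, stated in full; the proofs are below) =====
def Claim_equal_printLuckyNumberLoop : Prop := ∀ (n : Int), Dom_printLuckyNumberLoop n → Spec_printLuckyNumberLoop n (printLuckyNumberLoop n)

-- ===== LEMMAS AND PROOFS =====

-- building the list by repeated append is mapping
theorem foldl_append_singleton (f : Int → Int) (l : List Int) (acc : List Int) :
    l.foldl (fun a i => a ++ [f i]) acc = acc ++ l.map f := by
  induction l generalizing acc with
  | nil => simp
  | cons x xs ih => simp [List.foldl, ih]

-- the inner loop only removes elements
theorem innerA_sublist (fuel k i : Nat) (arr : List Int) : (innerA k i arr fuel).Sublist arr := by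
  induction fuel generalizing i arr with
  | zero => exact List.Sublist.refl _
  | succ fuel ih =>
    rw [innerA]
    split
    · exact (ih _ _).trans (List.eraseIdx_sublist arr i)
    · exact List.Sublist.refl _

theorem outerA_sublist (fuel k : Nat) (arr : List Int) : (outerA k arr fuel).Sublist arr := by
  induction fuel generalizing k arr with
  | zero => exact List.Sublist.refl _
  | succ fuel ih =>
    rw [outerA]
    split
    · exact (ih _ _).trans (innerA_sublist arr.length k k arr)
    · exact List.Sublist.refl _

-- where a surviving element of the pass lands (fuel ≥ arr.length - i suffices)
theorem innerA_get (fuel k i : Nat) (arr : List Int) (hfuel : arr.length ≤ fuel + i) :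
    ∀ j, j < arr.length → (j < i ∨ (j - i) % (k + 1) ≠ 0) →
    (innerA k i arr fuel)[if j < i then j else j - ((j - i) / (k + 1) + 1)]? = arr[j]? := by
  induction fuel generalizing i arr with
  | zero =>
    intro j hj hcond
    have : j < i := by omega
    simp [innerA, this]
  | succ fuel ih =>
    intro j hj hcond
    rw [innerA]
    by_cases h : i < arr.length
    · rw [if_pos h]
      have hlen' : (arr.eraseIdx i).length = arr.length - 1 := by
        simp [List.length_eraseIdx, h]
      rcases Nat.lt_or_ge j i with hji | hji
      · -- element before the popped index: index unchanged
        have h1 := ih (i + k) (arr.eraseIdx i) (by omega) j (by omega) (Or.inl (by omega))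
        have h2 : (arr.eraseIdx i)[j]? = arr[j]? := by
          rw [List.getElem?_eraseIdx]
          simp [Nat.not_le.mpr hji]
        simp only [if_pos (show j < i + k by omega)] at h1
        simp only [if_pos hji]
        rw [h1, h2]
      · -- j > i (j = i is removed, excluded by hcond)
        have hj_ne : j ≠ i := by
          intro hEq; subst hEq
          rcases hcond with h' | h'
          · omega
          · simp at h'
        have hjgt : i < j := by omega
        have h2 : (arr.eraseIdx i)[j - 1]? = arr[j]? := by
          rw [List.getElem?_eraseIdx]
          have : ¬ (j - 1 < i) := by omega
          simp only [if_neg this]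
          congr 1; omega
        rcases Nat.lt_or_ge j (i + k + 1) with hsmall | hbig
        · -- j ≤ i + k : the new index is j - 1, still before the next pop position
          have hdiv : (j - i) / (k + 1) = 0 := Nat.div_eq_of_lt (by omega)
          have h1 := ih (i + k) (arr.eraseIdx i) (by omega) (j - 1) (by omega) (Or.inl (by omega))
          simp only [if_pos (show j - 1 < i + k by omega)] at h1
          simp only [if_neg (Nat.not_lt.mpr hji), hdiv]
          rw [show j - (0 + 1) = j - 1 by omega, h1, h2]
        · -- j ≥ i + k + 1 : shift by one period
          have hmod : (j - 1 - (i + k)) % (k + 1) = (j - i) % (k + 1) := by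
            have : j - i = (j - 1 - (i + k)) + (k + 1) := by omega
            rw [this, Nat.add_mod_right]
          have hcond' : (j - 1 - (i + k)) % (k + 1) ≠ 0 := by
            rw [hmod]
            rcases hcond with h' | h'
            · omega
            · exact h'
          have h1 := ih (i + k) (arr.eraseIdx i) (by omega) (j - 1) (by omega) (Or.inr hcond')
          simp only [if_neg (show ¬ (j - 1 < i + k) by omega)] at h1
          have hdiv : (j - i) / (k + 1) = (j - 1 - (i + k)) / (k + 1) + 1 := by
            have : j - i = (j - 1 - (i + k)) + (k + 1) := by omega
            rw [this, Nat.add_div_right _ (by omega)]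
          simp only [if_neg (Nat.not_lt.mpr hji), hdiv]
          rw [show j - ((j - 1 - (i + k)) / (k + 1) + 1 + 1) = j - 1 - ((j - 1 - (i + k)) / (k + 1) + 1) by omega, h1, h2]
    · rw [if_neg h]
      have : j < i := by omega
      simp [this]

-- every element of the pass's output comes from a surviving input position
theorem innerA_mem (fuel k i : Nat) (arr : List Int) (hfuel : arr.length ≤ fuel + i) :
    ∀ x, x ∈ innerA k i arr fuel → ∃ j, ∃ _ : j < arr.length, (j < i ∨ (j - i) % (k + 1) ≠ 0) ∧ arr[j] = x := by
  induction fuel generalizing i arr with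
  | zero =>
    intro x hx
    rw [innerA] at hx
    obtain ⟨j, hj, hget⟩ := List.getElem_of_mem hx
    exact ⟨j, hj, Or.inl (by omega), hget⟩
  | succ fuel ih =>
    intro x hx
    rw [innerA] at hx
    by_cases h : i < arr.length
    · rw [if_pos h] at hx
      have hlen' : (arr.eraseIdx i).length = arr.length - 1 := by
        simp [List.length_eraseIdx, h]
      obtain ⟨j', hj', hcond', hget'⟩ := ih (i + k) (arr.eraseIdx i) (by omega) x hx
      rw [hlen'] at hj'
      rcases Nat.lt_or_ge j' i with hlt | hge
      · refine ⟨j', by omega, Or.inl (by omega), ?_⟩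
        rw [← hget']
        exact (List.getElem_eraseIdx_of_lt (by omega) hlt).symm
      · refine ⟨j' + 1, by omega, ?_, ?_⟩
        · right
          rcases Nat.lt_or_ge j' (i + k) with hc | hc
          · -- j' < i + k : 1 ≤ j'+1-i ≤ k
            have hlt2 : (j' + 1 - i) < k + 1 := by omega
            rw [Nat.mod_eq_of_lt hlt2]; omega
          · have h' : (j' - (i + k)) % (k + 1) ≠ 0 := by
              rcases hcond' with h' | h'
              · omega
              · exact h'
            have e : j' + 1 - i = (j' - (i + k)) + (k + 1) := by omega
            rw [e, Nat.add_mod_right]; exact h'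
        · rw [← hget']
          exact (List.getElem_eraseIdx_of_ge (by omega) hge).symm
    · rw [if_neg h] at hx
      obtain ⟨j, hj, hget⟩ := List.getElem_of_mem hx
      exact ⟨j, hj, Or.inl (by omega), hget⟩

-- the pass's output length
theorem innerA_length (fuel k i : Nat) (arr : List Int) (hfuel : arr.length ≤ fuel + i) :
    (innerA k i arr fuel).length =
      arr.length - (if i < arr.length then (arr.length - i - 1) / (k + 1) + 1 else 0) := by
  induction fuel generalizing i arr with
  | zero =>
    have : ¬ i < arr.length := by omega
    simp [innerA, this]
  | succ fuel ih =>
    rw [innerA]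
    by_cases h : i < arr.length
    · rw [if_pos h]
      have hlen' : (arr.eraseIdx i).length = arr.length - 1 := by
        simp [List.length_eraseIdx, h]
      rw [ih (i + k) (arr.eraseIdx i) (by omega), hlen']
      rcases Nat.lt_or_ge (i + k) (arr.length - 1) with hlt | hge
      · simp only [if_pos hlt, if_pos h]
        have e1 : arr.length - i - 1 = (arr.length - 1 - (i + k) - 1) + (k + 1) := by omega
        rw [e1, Nat.add_div_right _ (by omega)]
        have := Nat.div_le_self (arr.length - 1 - (i + k) - 1) (k + 1)
        omega
      · simp only [if_neg (Nat.not_lt.mpr hge), if_pos h]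
        have : (arr.length - i - 1) / (k + 1) = 0 := Nat.div_eq_of_lt (by omega)
        omega
    · simp [h]

-- the outer loop tracked arithmetically: x sits at index idx of arr, survives iff loopB says so
theorem outer_loop (fuel k : Nat) (arr : List Int) (hfuel : arr.length ≤ fuel + k) :
    ∀ (idx : Nat) (x : Int), arr.Nodup → ∀ _ : idx < arr.length, arr[idx] = x →
    ((x ∈ outerA k arr fuel) ↔ loopB k idx arr.length = true) := by
  induction fuel generalizing k arr with
  | zero =>
    intro idx x _ hidx hget
    have h : ¬ k < arr.length := by omega
    rw [outerA, loopB, dif_neg h]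
    simp [← hget, List.getElem_mem]
  | succ fuel ih =>
    intro idx x hnd hidx hget
    rw [outerA, loopB]
    by_cases h : k < arr.length
    · rw [if_pos h, dif_pos h]
      by_cases hrem : (idx + 1) % (k + 1) = 0
      · -- the pass removes x
        simp only [if_pos hrem]
        simp only [Bool.false_eq_true, iff_false]
        intro hmem
        have hmem' : x ∈ innerA k k arr arr.length :=
          (outerA_sublist fuel (k + 1) (innerA k k arr arr.length)).mem hmem
        obtain ⟨j, hj, hcond, hjget⟩ := innerA_mem arr.length k k arr (by omega) x hmem'
        have hj_eq : j = idx :=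
          (List.Nodup.getElem_inj_iff hnd (hi := hj) (hj := hidx)).mp (by rw [hjget, hget])
        subst hj_eq
        have hik : k ≤ j := by
          by_contra hc
          have : (j + 1) % (k + 1) = j + 1 := Nat.mod_eq_of_lt (by omega)
          omega
        rcases hcond with h' | h'
        · omega
        · have : j + 1 = (j - k) + (k + 1) := by omega
          rw [this, Nat.add_mod_right] at hrem
          exact h' hrem
      · -- x survives the pass; recurse
        simp only [if_neg hrem]
        -- idx = k is impossible ((k+1) % (k+1) = 0)
        have hne : idx ≠ k := by
          intro hEq; subst hEq; simp at hrem
        have hsurv : idx < k ∨ (idx - k) % (k + 1) ≠ 0 := by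
          rcases Nat.lt_or_ge idx k with hc | hc
          · exact Or.inl hc
          · right
            intro hc0
            have : idx + 1 = (idx - k) + (k + 1) := by omega
            rw [this, Nat.add_mod_right] at hrem
            exact hrem hc0
        have hget' := innerA_get arr.length k k arr (by omega) idx hidx hsurv
        have hposeq : (if idx < k then idx else idx - ((idx - k) / (k + 1) + 1)) = idx - idx / (k + 1) := by
          rcases Nat.lt_or_ge idx k with hc | hc
          · simp only [if_pos hc]
            have : idx / (k + 1) = 0 := Nat.div_eq_of_lt (by omega)
            omega
          · simp only [if_neg (Nat.not_lt.mpr hc)]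
            have e2 : (idx + 1) / (k + 1) = (idx - k) / (k + 1) + 1 := by
              rw [show idx + 1 = (idx - k) + (k + 1) by omega, Nat.add_div_right _ (by omega)]
            have e3 : (idx + 1) / (k + 1) = idx / (k + 1) := by
              rw [Nat.succ_div]
              have : ¬ (k + 1) ∣ (idx + 1) := by
                intro hdvd
                exact hrem (Nat.dvd_iff_mod_eq_zero.mp hdvd)
              simp [this]
            omega
        rw [hposeq] at hget'
        have hsome : (innerA k k arr arr.length)[idx - idx / (k + 1)]? = some x :=
          hget'.trans (by rw [List.getElem?_eq_getElem hidx, hget])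
        obtain ⟨hidx', hget''⟩ := List.getElem?_eq_some_iff.mp hsome
        have hlen : (innerA k k arr arr.length).length = arr.length - arr.length / (k + 1) := by
          rw [innerA_length arr.length k k arr (by omega)]
          simp only [if_pos h]
          have : arr.length / (k + 1) = (arr.length - k - 1) / (k + 1) + 1 := by
            conv_lhs => rw [show arr.length = (arr.length - k - 1) + (k + 1) by omega]
            rw [Nat.add_div_right _ (by omega)]
          omega
        have hrec := ih (k + 1) (innerA k k arr arr.length)
          (by have := (innerA_sublist arr.length k k arr).length_le; omega)
          (idx - idx / (k + 1)) x ((innerA_sublist arr.length k k arr).nodup hnd) hidx' hget''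
        rw [hlen] at hrec
        exact hrec
    · rw [if_neg h, dif_neg h]
      simp [← hget, List.getElem_mem]

-- ===== VERDICT (by name: the statement is the Claim_ definition above) =====
theorem printLuckyNumberLoop_spec : Claim_equal_printLuckyNumberLoop := by
  unfold Claim_equal_printLuckyNumberLoop
  intro n _
  unfold Spec_printLuckyNumberLoop printLuckyNumberLoop printLuckyNumberLoop_alt
  by_cases hn : n < 1
  · have : PySem.List.pyRange 0 n 1 = [] := PySem.List.pyRange_one_eq_nil (by omega)
    simp only [this, List.foldl_nil, if_pos hn]
    rw [show outerA 1 ([] : List Int) ([] : List Int).length = [] by rfl]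
    simp [PySem.List.index?]
  · -- n ≥ 1
    simp only [if_neg hn]
    rw [foldl_append_singleton (fun i => i + 1) (PySem.List.pyRange 0 n 1) []]
    rw [PySem.List.pyRange_one 0 n]
    rw [List.nil_append, List.map_map]
    have hfun : ((fun i => i + 1) ∘ fun k : Nat => 0 + (k : Int)) = fun k : Nat => (k : Int) + 1 := by
      funext k; simp
    rw [hfun]
    have hN0 : (n - 0).toNat = n.toNat := by omega
    rw [hN0]
    set N := n.toNat with hN
    have hN1 : 1 ≤ N := by omega
    set arr : List Int := (List.range N).map (fun k : Nat => (k : Int) + 1) with harr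
    have hlen : arr.length = N := by simp [harr]
    have hnd : arr.Nodup := by
      apply List.Nodup.map
      · intro a b hab; simpa using hab
      · exact List.nodup_range
    have hidx : N - 1 < arr.length := by omega
    have hget : arr[N - 1] = n := by
      simp only [harr, List.getElem_map, List.getElem_range]
      omega
    have hloop := outer_loop arr.length 1 arr (by omega) (N - 1) n hnd hidx hget
    have e : loopB 1 (N - 1) arr.length = loopB 1 (N - 1) N := by rw [hlen]
    rw [e] at hloop
    have htn : (n - 1).toNat = N - 1 := by omega
    rw [htn]
    rcases hmem : PySem.List.index? (outerA 1 arr arr.length) n with _ | j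
    · have hnot : n ∉ outerA 1 arr arr.length :=
        (PySem.List.index?_eq_none_iff (outerA 1 arr arr.length) n).mp hmem
      have : loopB 1 (N - 1) N ≠ true := fun hc => hnot (hloop.mpr hc)
      exact ((Bool.not_eq_true _).mp this).symm
    · have hmem' : n ∈ outerA 1 arr arr.length := by
        have := PySem.List.index?_isSome_iff (outerA 1 arr arr.length) n
        rw [hmem] at this; simpa using this
      exact (hloop.mp hmem').symm
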